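-- pv_equiv track=rewrite | github.com/hitendras510/OpenCloud-SRE | utils/forensic_report.py | _extract_root_cause
-- ===== SOURCE A (Python) =====
-- from typing import Any, Dict, List, Optional
--
-- def _extract_root_cause(chat_history: List[Dict]) -> str:
--     """
--     Scan the chat history to find the most informative root cause string.
--     Prioritises ChatOps rationale, then Lead SRE analysis, then Network/DB intents.
--     """
--     for msg in reversed(chat_history):
--         role = msg.get("role", "")
--         content = msg.get("content", "")
--         if role == "chatops" and "Rationale=" in content:
--             try:
--                 return content.split("Rationale=")[1].strip()
--             except IndexError:
--                 pass
--
--     for msg in reversed(chat_history):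
--         role = msg.get("role", "")
--         content = msg.get("content", "")
--         if role == "lead_sre" and "Shadow Consensus" in content:
--             return content.replace("[Shadow Consensus]", "").strip()
--
--     for msg in reversed(chat_history):
--         role = msg.get("role", "")
--         content = msg.get("content", "")
--         if role in ("network_ctrl", "db_ctrl") and "root_cause" in content.lower():
--             return content[:200]
--
--     return "Anomalous state detected across multiple metrics. Multi-agent consensus required to identify primary driver."
-- ===== SOURCE B (Python) =====
-- def _extract_root_cause(chat_history):
--     """Single reversed pass filling three priority slots, then pick by priority."""
--     chatops_rationale = lead_sre_consensus = netdb_cause = None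
--     for msg in reversed(chat_history):
--         role = msg.get("role", "")
--         content = msg.get("content", "")
--         if chatops_rationale is None and role == "chatops" and "Rationale=" in content:
--             chatops_rationale = content.split("Rationale=")[1].strip()
--         if lead_sre_consensus is None and role == "lead_sre" and "Shadow Consensus" in content:
--             lead_sre_consensus = content.replace("[Shadow Consensus]", "").strip()
--         if netdb_cause is None and role in ("network_ctrl", "db_ctrl") and "root_cause" in content.lower():
--             netdb_cause = content[:200]
--     if chatops_rationale is not None:
--         return chatops_rationale
--     if lead_sre_consensus is not None:
--         return lead_sre_consensus
--     if netdb_cause is not None: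
--         return netdb_cause
--     return "Anomalous state detected across multiple metrics. Multi-agent consensus required to identify primary driver."
-- ===== Notes on version B (the rewrite author's own statement) =====
-- stated objective: alternative
-- what changed: Replaces A's three separate reversed passes (one per priority category) by a single reversed pass that fills three Optional slots, each only on its first match, then returns the slots in priority order.
import Mathlib
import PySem

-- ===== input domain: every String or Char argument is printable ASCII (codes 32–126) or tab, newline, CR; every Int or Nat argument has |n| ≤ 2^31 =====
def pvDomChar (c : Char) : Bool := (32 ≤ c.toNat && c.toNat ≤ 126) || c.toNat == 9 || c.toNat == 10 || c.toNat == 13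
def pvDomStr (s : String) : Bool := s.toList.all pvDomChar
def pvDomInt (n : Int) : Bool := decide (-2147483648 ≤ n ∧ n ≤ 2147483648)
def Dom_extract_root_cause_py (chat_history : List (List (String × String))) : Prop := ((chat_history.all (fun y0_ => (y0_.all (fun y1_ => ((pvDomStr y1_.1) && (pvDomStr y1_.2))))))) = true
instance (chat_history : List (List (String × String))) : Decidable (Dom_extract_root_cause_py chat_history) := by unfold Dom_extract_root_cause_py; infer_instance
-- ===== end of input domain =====

-- B replaces A's three reversed passes by ONE reversed pass maintaining three priority slots; same return value.

-- msg.get(k, "") on the dict (association list, first match)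
def pvGetMsg (m : List (String × String)) (k : String) : String :=
  ((m.find? (fun p => p.1 == k)).map (·.2)).getD ""

-- content.split("Rationale=")[1].strip(), as an Option (none = the dead IndexError path)
def pvRationale (content : String) : Option String :=
  (PySem.List.pyGet? ((PySem.Str.split? content "Rationale=").getD []) 1).map PySem.Str.strip

def pvDefaultCause : String :=
  "Anomalous state detected across multiple metrics. Multi-agent consensus required to identify primary driver."

-- the three per-message tests (shared per-message conditions; each pass of A keeps its own loop)
def pvIsChatops (role content : String) : Bool :=
  role == "chatops" && PySem.Str.isIn "Rationale=" content
def pvIsLead (role content : String) : Bool :=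
  role == "lead_sre" && PySem.Str.isIn "Shadow Consensus" content
def pvIsNetdb (role content : String) : Bool :=
  (role == "network_ctrl" || role == "db_ctrl") && PySem.Str.isIn "root_cause" (PySem.Str.lower content)

-- ===== PORT A ===== (three separate reversed scans, in priority order)
def pvFindChatops : List (List (String × String)) → Option String
  | [] => none
  | m :: rest =>
    let role := pvGetMsg m "role"
    let content := pvGetMsg m "content"
    if pvIsChatops role content then
      match pvRationale content with
      | some s => some s       -- return parts[1].strip()
      | none => pvFindChatops rest   -- except IndexError: pass (dead path)
    else pvFindChatops rest

def pvFindLead : List (List (String × String)) → Option String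
  | [] => none
  | m :: rest =>
    let role := pvGetMsg m "role"
    let content := pvGetMsg m "content"
    if pvIsLead role content then
      some (PySem.Str.strip (PySem.Str.replace content "[Shadow Consensus]" ""))
    else pvFindLead rest

def pvFindNetdb : List (List (String × String)) → Option String
  | [] => none
  | m :: rest =>
    let role := pvGetMsg m "role"
    let content := pvGetMsg m "content"
    if pvIsNetdb role content then
      some (PySem.Str.slice content none (some 200))   -- content[:200]
    else pvFindNetdb rest

def extract_root_cause_py (chat_history : List (List (String × String))) : String :=
  match pvFindChatops chat_history.reverse with
  | some s => s
  | none =>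
    match pvFindLead chat_history.reverse with
    | some s => s
    | none =>
      match pvFindNetdb chat_history.reverse with
      | some s => s
      | none => pvDefaultCause

-- ===== PORT B ===== (one reversed fold filling three Optional slots)
def pvStep (st : Option String × Option String × Option String) (m : List (String × String)) :
    Option String × Option String × Option String :=
  let role := pvGetMsg m "role"
  let content := pvGetMsg m "content"
  let c := if st.1.isNone && pvIsChatops role content then pvRationale content else st.1
  let l := if st.2.1.isNone && pvIsLead role content then
             some (PySem.Str.strip (PySem.Str.replace content "[Shadow Consensus]" ""))
           else st.2.1
  let n := if st.2.2.isNone && pvIsNetdb role content then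
             some (PySem.Str.slice content none (some 200))
           else st.2.2
  (c, l, n)

def extract_root_cause_py_alt (chat_history : List (List (String × String))) : String :=
  let st := chat_history.reverse.foldl pvStep (none, none, none)
  match st.1 with
  | some s => s
  | none =>
    match st.2.1 with
    | some s => s
    | none =>
      match st.2.2 with
      | some s => s
      | none => pvDefaultCause

-- ===== PRECONDITION & SPEC =====
def Spec_extract_root_cause_py (chat_history : List (List (String × String))) (out : String) : Prop := out = extract_root_cause_py_alt chat_history
instance (chat_history : List (List (String × String))) (out : String) : Decidable (Spec_extract_root_cause_py chat_history out) := by unfold Spec_extract_root_cause_py; infer_instance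

-- ===== CLAIM (what is proved, stated in full; the proofs are below) =====
def Claim_equal_extract_root_cause_py : Prop := ∀ (chat_history : List (List (String × String))), Dom_extract_root_cause_py chat_history → Spec_extract_root_cause_py chat_history (extract_root_cause_py chat_history)

-- ===== LEMMAS AND PROOFS =====

-- The fold's invariant: each slot is its current value or, if still empty, the first match of its scan.
theorem pvFold_eq (l : List (List (String × String))) :
    ∀ (a b c : Option String),
      l.foldl pvStep (a, b, c) =
        (a.orElse (fun _ => pvFindChatops l),
         b.orElse (fun _ => pvFindLead l),
         c.orElse (fun _ => pvFindNetdb l)) := by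
  induction l with
  | nil => intro a b c; cases a <;> cases b <;> cases c <;> simp [Option.orElse, pvFindChatops, pvFindLead, pvFindNetdb]
  | cons m rest ih =>
    intro a b c
    simp only [List.foldl_cons, pvStep, pvFindChatops, pvFindLead, pvFindNetdb, ih]
    cases a <;> cases b <;> cases c <;>
      simp [Option.orElse] <;>
      split_ifs <;>
      simp_all <;>
      (try cases h : pvRationale (pvGetMsg m "content")) <;>
      simp_all [Option.orElse]

-- ===== VERDICT (by name: the statement is the Claim_ definition above) =====
theorem extract_root_cause_py_spec : Claim_equal_extract_root_cause_py := by
  intro ch _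
  unfold Spec_extract_root_cause_py extract_root_cause_py extract_root_cause_py_alt
  rw [pvFold_eq]
  simp [Option.orElse]
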